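-- pv_equiv track=rewrite | github.com/yourbonusmy-cpu/FirstSiteEnglish | apps/ingestion/services/phrasal_extractor.py | build_pv_index
-- ===== SOURCE A (Python) =====
-- from collections import defaultdict
--
-- def build_pv_index(phrasal_verbs: set[str]) -> dict[str, list[list[str]]]:
--     index = defaultdict(list)
--     for pv in phrasal_verbs:
--         parts = pv.split()
--         index[parts[0]].append(parts[1:])
--     # длинные хвосты первыми
--     for verb in index:
--         index[verb].sort(key=lambda x: -len(x))
--     return index
-- ===== SOURCE B (Python) =====
-- from collections import defaultdict
--
--
-- def build_pv_index(phrasal_verbs):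
--     splits = [pv.split() for pv in phrasal_verbs]
--     # keys registered in first-appearance order, then one global stable sort
--     # by descending tail length and a single append pass (no per-key sort).
--     index = defaultdict(list, {p[0]: [] for p in splits})
--     for p in sorted(splits, key=lambda p: 1 - len(p)):
--         index[p[0]].append(p[1:])
--     return index
-- ===== Notes on version B (the rewrite author's own statement) =====
-- stated objective: alternative
-- what changed: Instead of grouping first and then sorting each bucket separately, B splits once, registers keys in first-appearance order, performs one global stable sort of all splits by descending tail length, and fills the buckets in a single append pass.
import Mathlib
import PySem

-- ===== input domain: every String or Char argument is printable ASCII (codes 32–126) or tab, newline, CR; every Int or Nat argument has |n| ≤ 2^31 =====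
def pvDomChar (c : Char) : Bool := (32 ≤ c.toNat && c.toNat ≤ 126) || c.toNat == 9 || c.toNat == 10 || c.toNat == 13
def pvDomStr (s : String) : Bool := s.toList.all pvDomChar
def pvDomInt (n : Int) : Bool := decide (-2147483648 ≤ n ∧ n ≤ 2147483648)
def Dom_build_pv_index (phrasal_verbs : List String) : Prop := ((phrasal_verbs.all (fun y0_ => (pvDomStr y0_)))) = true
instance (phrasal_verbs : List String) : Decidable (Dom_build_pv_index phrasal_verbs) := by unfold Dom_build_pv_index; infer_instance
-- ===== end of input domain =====

-- B replaces A's group-then-sort-each-bucket strategy by one global stable sort of the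
-- splits by descending tail length followed by a single append pass (objective: alternative).
-- Equivalence is about the RETURN value; neither version mutates its argument.

-- ===== PORT A =====
-- A: for pv in phrasal_verbs: parts = pv.split(); index[parts[0]].append(parts[1:])
--    then for verb in index: index[verb].sort(key=lambda x: -len(x))
-- parts[0] on an empty split is an IndexError (excluded by Pre_); the [] branch is arbitrary there.
def build_pv_index (phrasal_verbs : List String) : List (String × List (List String)) :=
  let index : PySem.Dict String (List (List String)) :=
    phrasal_verbs.foldl (fun d pv =>
      match PySem.Str.split₀ pv with
      | [] => d
      | h :: t => d.modify h [] (fun v => v ++ [t])) PySem.Dict.empty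
  let index2 : PySem.Dict String (List (List String)) :=
    index.keys.foldl (fun d verb =>
      d.modify verb [] (fun v => PySem.List.sorted v (fun x => -(x.length : Int)) false)) index
  index2.items

-- ===== PORT B =====
-- B: splits = [pv.split() for pv in phrasal_verbs]
--    index = defaultdict(list, {p[0]: [] for p in splits})       (keys in first-appearance order)
--    for p in sorted(splits, key=lambda p: 1 - len(p)): index[p[0]].append(p[1:])
-- p[0] on an empty split is an IndexError (excluded by Pre_); the [] branch is arbitrary there.
def build_pv_index_alt (phrasal_verbs : List String) : List (String × List (List String)) :=
  let splits := phrasal_verbs.map (fun pv => PySem.Str.split₀ pv)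
  let index0 : PySem.Dict String (List (List String)) :=
    splits.foldl (fun d p =>
      match p with
      | [] => d
      | h :: _ => d.insert h []) PySem.Dict.empty
  let index : PySem.Dict String (List (List String)) :=
    (PySem.List.sorted splits (fun p => 1 - (p.length : Int)) false).foldl
      (fun d p =>
        match p with
        | [] => d
        | h :: t => d.modify h [] (fun v => v ++ [t])) index0
  index.items

-- ===== PRECONDITION & SPEC =====
-- Pre_ excludes exactly the inputs containing a string with no non-whitespace character:
-- there pv.split() is empty and parts[0] raises IndexError in A (and p[0] in B).
def Pre_build_pv_index (phrasal_verbs : List String) : Prop :=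
  ∀ pv ∈ phrasal_verbs, PySem.Str.split₀ pv ≠ []
instance (phrasal_verbs : List String) : Decidable (Pre_build_pv_index phrasal_verbs) := by
  unfold Pre_build_pv_index; infer_instance
def pvWitness_build_pv_index : List String :=
  ["pick up", "pick on quickly", "give up", "pick up"]
def Spec_build_pv_index (phrasal_verbs : List String) (out : List (String × List (List String))) : Prop := out = build_pv_index_alt phrasal_verbs
instance (phrasal_verbs : List String) (out : List (String × List (List String))) : Decidable (Spec_build_pv_index phrasal_verbs out) := by unfold Spec_build_pv_index; infer_instance

-- ===== CLAIM (what is proved, stated in full; the proofs are below) =====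
def Claim_equal_build_pv_index : Prop := ∀ (phrasal_verbs : List String), Dom_build_pv_index phrasal_verbs → Pre_build_pv_index phrasal_verbs → Spec_build_pv_index phrasal_verbs (build_pv_index phrasal_verbs)

-- ===== LEMMAS AND PROOFS =====

-- insertBy with a key puts x in front when its key is below every element's key
theorem insertBy_eq_cons_of_forall {α : Type} (key : α → Int) (x : α) (zs : List α)
    (h : ∀ z ∈ zs, key x < key z) :
    PySem.List.insertBy (fun a b => decide (key a < key b)) x zs = x :: zs := by
  cases zs with
  | nil => rfl
  | cons z t =>
    simp [PySem.List.insertBy, h z (by simp)]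

-- insertBy preserves sortedness by the key
theorem pairwise_insertBy {α : Type} (key : α → Int) (x : α) (acc : List α)
    (h : acc.Pairwise (fun a b => key a ≤ key b)) :
    (PySem.List.insertBy (fun a b => decide (key a < key b)) x acc).Pairwise
      (fun a b => key a ≤ key b) := by
  induction acc with
  | nil => simp [PySem.List.insertBy]
  | cons y ys ih =>
    rcases List.pairwise_cons.mp h with ⟨hy, hys⟩
    by_cases hxy : key x < key y
    · simp only [PySem.List.insertBy, hxy, decide_true, if_true]
      refine List.pairwise_cons.mpr ⟨?_, h⟩
      intro b hb
      rcases List.mem_cons.mp hb with rfl | hb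
      · exact le_of_lt hxy
      · exact le_trans (le_of_lt hxy) (hy b hb)
    · simp only [PySem.List.insertBy, hxy, decide_false, Bool.false_eq_true, if_false]
      refine List.pairwise_cons.mpr ⟨?_, ih hys⟩
      intro b hb
      rcases (PySem.List.mem_insertBy _ x b ys).mp hb with hb | hb
      · subst hb; omega
      · exact hy b hb

-- filtering commutes with inserting into a sorted accumulator
theorem filter_insertBy {α : Type} (key : α → Int) (p : α → Bool) (x : α) (acc : List α)
    (hs : acc.Pairwise (fun a b => key a ≤ key b)) :
    (PySem.List.insertBy (fun a b => decide (key a < key b)) x acc).filter p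
      = if p x then PySem.List.insertBy (fun a b => decide (key a < key b)) x (acc.filter p)
        else acc.filter p := by
  induction acc with
  | nil => cases hpx : p x <;> simp [PySem.List.insertBy, hpx]
  | cons y ys ih =>
    rcases List.pairwise_cons.mp hs with ⟨hy, hys⟩
    by_cases hxy : key x < key y
    · simp only [PySem.List.insertBy, hxy, decide_true, if_true]
      cases hpx : p x with
      | true =>
        have hfront : ∀ z ∈ (y :: ys).filter p, key x < key z := by
          intro z hz
          rcases List.mem_cons.mp (List.mem_of_mem_filter hz) with rfl | hz'
          · exact hxy
          · exact lt_of_lt_of_le hxy (hy z hz')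
        rw [insertBy_eq_cons_of_forall key x _ hfront]
        simp [hpx]
      | false => simp [hpx]
    · simp only [PySem.List.insertBy, hxy, decide_false, Bool.false_eq_true, if_false]
      cases hpy : p y with
      | true =>
        cases hpx : p x with
        | true =>
          have : PySem.List.insertBy (fun a b => decide (key a < key b)) x ((y :: ys).filter p)
              = y :: PySem.List.insertBy (fun a b => decide (key a < key b)) x (ys.filter p) := by
            simp [hpy, PySem.List.insertBy, hxy]
          rw [this]
          simp only [List.filter_cons, hpy]
          rw [ih hys]
          simp only [hpx, if_true]
        | false =>
          simp only [List.filter_cons, hpy]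
          rw [ih hys]
          simp only [hpx, Bool.false_eq_true, if_false]
      | false =>
        simp only [List.filter_cons, hpy]
        rw [ih hys]
        cases hpx : p x <;> simp [hpx]

-- the insertion-sort fold commutes with filtering
theorem foldl_insertBy_filter {α : Type} (key : α → Int) (p : α → Bool) (l : List α) :
    ∀ acc : List α, acc.Pairwise (fun a b => key a ≤ key b) →
    (l.foldl (fun a x => PySem.List.insertBy (fun a b => decide (key a < key b)) x a) acc).filter p
      = (l.filter p).foldl
          (fun a x => PySem.List.insertBy (fun a b => decide (key a < key b)) x a) (acc.filter p) := by
  induction l with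
  | nil => intro acc _; rfl
  | cons x t ih =>
    intro acc hs
    simp only [List.foldl_cons, List.filter_cons]
    rw [ih _ (pairwise_insertBy key x acc hs), filter_insertBy key p x acc hs]
    cases hpx : p x <;> simp [hpx]

-- sorted commutes with filter (stability, as Python's stable sort guarantees)
theorem filter_sorted {α : Type} (key : α → Int) (p : α → Bool) (l : List α) :
    (PySem.List.sorted l key false).filter p = PySem.List.sorted (l.filter p) key false := by
  rw [PySem.List.sorted_eq_foldl_insertBy, PySem.List.sorted_eq_foldl_insertBy]
  simpa using foldl_insertBy_filter key p l [] (by simp)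

-- inserting a mapped element commutes with mapping, when the keys agree
theorem insertBy_map {α β : Type} (f : α → β) (kα : α → Int) (kβ : β → Int) (x : α) (acc : List α)
    (hx : kβ (f x) = kα x) (hacc : ∀ a ∈ acc, kβ (f a) = kα a) :
    PySem.List.insertBy (fun a b => decide (kβ a < kβ b)) (f x) (acc.map f)
      = (PySem.List.insertBy (fun a b => decide (kα a < kα b)) x acc).map f := by
  induction acc with
  | nil => rfl
  | cons y ys ih =>
    have hy : kβ (f y) = kα y := hacc y (by simp)
    by_cases hxy : kα x < kα y
    · simp [PySem.List.insertBy, hx, hy, hxy]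
    · simp only [List.map_cons, PySem.List.insertBy, hx, hy, hxy, decide_false,
        Bool.false_eq_true, if_false]
      rw [ih (fun a ha => hacc a (by simp [ha]))]

-- the insertion-sort fold commutes with mapping, when the keys agree
theorem foldl_insertBy_map {α β : Type} (f : α → β) (kα : α → Int) (kβ : β → Int) (l : List α) :
    ∀ acc : List α, (∀ a ∈ l, kβ (f a) = kα a) → (∀ a ∈ acc, kβ (f a) = kα a) →
    l.foldl (fun a x => PySem.List.insertBy (fun a b => decide (kβ a < kβ b)) (f x) a) (acc.map f)
      = (l.foldl (fun a x => PySem.List.insertBy (fun a b => decide (kα a < kα b)) x a) acc).map f := by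
  induction l with
  | nil => intro acc _ _; rfl
  | cons x t ih =>
    intro acc hl hacc
    simp only [List.foldl_cons]
    rw [insertBy_map f kα kβ x acc (hl x (by simp)) hacc]
    refine ih _ (fun a ha => hl a (by simp [ha])) (fun a ha => ?_)
    rcases (PySem.List.mem_insertBy _ x a acc).mp ha with rfl | ha
    · exact hl a (by simp)
    · exact hacc a ha

-- sorted commutes with map, when the keys agree on the elements
theorem sorted_map {α β : Type} (f : α → β) (kα : α → Int) (kβ : β → Int) (l : List α)
    (h : ∀ a ∈ l, kβ (f a) = kα a) :
    PySem.List.sorted (l.map f) kβ false = (PySem.List.sorted l kα false).map f := by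
  rw [PySem.List.sorted_eq_foldl_insertBy, PySem.List.sorted_eq_foldl_insertBy, List.foldl_map]
  simpa using foldl_insertBy_map f kα kβ l [] h (by simp)

-- Set.update by elements already present is the identity
theorem set_update_of_subset {α : Type} [BEq α] [LawfulBEq α] (s : PySem.Set α) (l : List α)
    (h : ∀ x ∈ l, x ∈ s) : PySem.Set.update s l = s := by
  induction l generalizing s with
  | nil => rfl
  | cons x t ih =>
    have hx : x ∈ s := h x (by simp)
    show PySem.Set.update (PySem.Set.add s x) t = s
    rw [show PySem.Set.add s x = s by simp [PySem.Set.add, PySem.Set.contains, hx]]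
    exact ih s (fun y hy => h y (by simp [hy]))

-- a fold of inserts of [] leaves every getD _ _ [] at []
theorem getD_foldl_insert_nil {β : Type} (l : List (List String))
    (d : PySem.Dict String (List β)) (hd : ∀ c, d.getD c [] = []) (c : String) :
    (l.foldl (fun d p => match p with
      | [] => d
      | h :: _ => d.insert h ([] : List β)) d).getD c [] = [] := by
  induction l generalizing d with
  | nil => exact hd c
  | cons p t ih =>
    cases p with
    | nil => exact ih d hd
    | cons h rest =>
      refine ih _ (fun c' => ?_)
      rw [PySem.Dict.getD_insert]
      split <;> simp [hd]

-- fold over nodup keys applying the same modify: pointwise description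
theorem getD_foldl_modify_sort (ks : List String) (hnd : ks.Nodup)
    (g : List (List String) → List (List String))
    (d : PySem.Dict String (List (List String))) (c : String) :
    (ks.foldl (fun d k => d.modify k [] g) d).getD c []
      = if c ∈ ks then g (d.getD c []) else d.getD c [] := by
  induction ks generalizing d with
  | nil => simp
  | cons k t ih =>
    rcases List.nodup_cons.mp hnd with ⟨hk, hnd'⟩
    simp only [List.foldl_cons]
    rw [ih hnd']
    by_cases hc : c = k
    · subst hc
      simp [hk]
    · rw [PySem.Dict.getD_modify]
      simp [hc]

-- the match-on-split fold is the pair fold over (head, tail), on nonempty splits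
theorem foldl_match_eq_pairs (L : List (List String)) (hL : ∀ p ∈ L, p ≠ [])
    (d : PySem.Dict String (List (List String))) :
    L.foldl (fun d p => match p with
      | [] => d
      | h :: t => d.modify h [] (fun v => v ++ [t])) d
      = (L.map (fun p => (p.headI, p.tail))).foldl
          (fun d q => d.modify q.1 [] (fun v => v ++ [q.2])) d := by
  rw [List.foldl_map]
  refine PySem.List.foldl_congr_mem L _ _ d (fun acc p hp => ?_)
  cases p with
  | nil => exact absurd rfl (hL [] hp)
  | cons h t => rfl

-- ports agree under Pre_
theorem ports_agree (phrasal_verbs : List String)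
    (hpre : ∀ pv ∈ phrasal_verbs, PySem.Str.split₀ pv ≠ []) :
    build_pv_index phrasal_verbs = build_pv_index_alt phrasal_verbs := by
  unfold build_pv_index build_pv_index_alt
  set splits := phrasal_verbs.map (fun pv => PySem.Str.split₀ pv) with hsplits
  have hne : ∀ p ∈ splits, p ≠ [] := by
    intro p hp
    rcases List.mem_map.mp hp with ⟨pv, hpv, rfl⟩
    exact hpre pv hpv
  -- rewrite A's first fold as a fold over splits
  have hAfold : phrasal_verbs.foldl (fun d pv =>
      match PySem.Str.split₀ pv with
      | [] => d
      | h :: t => d.modify h [] (fun v => v ++ [t])) PySem.Dict.empty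
      = splits.foldl (fun d p => match p with
      | [] => d
      | h :: t => d.modify h [] (fun v => v ++ [t])) PySem.Dict.empty := by
    rw [hsplits, List.foldl_map]
  rw [hAfold]
  set pairs := splits.map (fun p => (p.headI, p.tail)) with hpairs
  set dA := splits.foldl (fun d p => match p with
      | [] => d
      | h :: t => d.modify h [] (fun v => v ++ [t])) PySem.Dict.empty with hdA
  have hdApairs : dA = pairs.foldl (fun d q => d.modify q.1 [] (fun v => v ++ [q.2]))
      PySem.Dict.empty := foldl_match_eq_pairs splits hne _
  -- keys of dA
  have hkeysA : dA.keys = PySem.Set.ofList (splits.map (fun p => p.headI)) := by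
    rw [hdApairs, hpairs]
    rw [PySem.Dict.keys_foldl_modify_key pairs (fun q => q.1) [] (fun _ q v => v ++ [q.2])]
    simp [hpairs, List.map_map, Function.comp_def, PySem.Set.update, PySem.Set.ofList]
  have hndA : dA.keys.Nodup := by
    rw [hdApairs]
    exact PySem.Dict.nodup_keys_foldl_modify_key pairs (fun q => q.1) [] _ _ (by simp)
  -- value of dA at any key
  have hvalA : ∀ c, dA.getD c []
      = ((splits.filter (fun p => p.headI == c)).map (fun p => p.tail)) := by
    intro c
    rw [hdApairs, PySem.Dict.getD_foldl_modify_append]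
    simp [hpairs, List.filter_map, List.map_map, Function.comp_def]
  -- A's second fold
  set gA : List (List String) → List (List String) :=
    fun v => PySem.List.sorted v (fun x => -(x.length : Int)) false with hgA
  set dA2 := dA.keys.foldl (fun d verb => d.modify verb [] gA) dA with hdA2
  have hkeysA2 : dA2.keys = dA.keys := by
    rw [hdA2, PySem.Dict.keys_foldl_modify_key dA.keys (fun k => k) [] (fun _ k v => gA v)]
    simp only [List.map_id']
    exact set_update_of_subset dA.keys dA.keys (fun x hx => hx)
  have hndA2 : dA2.keys.Nodup := hkeysA2 ▸ hndA
  have hvalA2 : ∀ c ∈ dA.keys, dA2.getD c [] = gA (dA.getD c []) := by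
    intro c hc
    rw [hdA2, getD_foldl_modify_sort dA.keys hndA gA dA c]
    simp [hc]
  -- B's first fold
  set dB0 := splits.foldl (fun d p => match p with
      | [] => d
      | h :: _ => d.insert h ([] : List (List String))) PySem.Dict.empty with hdB0
  have hdB0pairs : dB0 = pairs.foldl (fun d q => d.insert q.1 ([] : List (List String)))
      PySem.Dict.empty := by
    conv_rhs => rw [hpairs, List.foldl_map]
    rw [hdB0]
    refine PySem.List.foldl_congr_mem splits _ _ _ (fun acc p hp => ?_)
    cases p with
    | nil => exact absurd rfl (hne [] hp)
    | cons h t => rfl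
  have hkeysB0 : dB0.keys = PySem.Set.ofList (splits.map (fun p => p.headI)) := by
    rw [hdB0pairs]
    rw [PySem.Dict.keys_foldl_insert_key pairs (fun q => q.1) (fun _ _ => [])]
    simp [hpairs, List.map_map, Function.comp_def, PySem.Set.update, PySem.Set.ofList]
  have hndB0 : dB0.keys.Nodup := by
    rw [hdB0pairs]
    exact PySem.Dict.nodup_keys_foldl_insert_key pairs (fun q => q.1) _ _ (by simp)
  have hvalB0 : ∀ c, dB0.getD c [] = [] := by
    intro c
    rw [hdB0]
    exact getD_foldl_insert_nil splits PySem.Dict.empty (by simp) c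
  -- B's second fold
  set ssorted := PySem.List.sorted splits (fun p => 1 - (p.length : Int)) false with hss
  have hness : ∀ p ∈ ssorted, p ≠ [] := by
    intro p hp
    exact hne p ((PySem.List.mem_sorted splits _ false p).mp hp)
  set spairs := ssorted.map (fun p => (p.headI, p.tail)) with hspairs
  set dB := ssorted.foldl (fun d p => match p with
      | [] => d
      | h :: t => d.modify h [] (fun v => v ++ [t])) dB0 with hdB
  have hdBpairs : dB = spairs.foldl (fun d q => d.modify q.1 [] (fun v => v ++ [q.2])) dB0 :=
    foldl_match_eq_pairs ssorted hness dB0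
  have hkeysB : dB.keys = PySem.Set.ofList (splits.map (fun p => p.headI)) := by
    rw [hdBpairs, PySem.Dict.keys_foldl_modify_key spairs (fun q => q.1) [] (fun _ q v => v ++ [q.2])]
    rw [hkeysB0]
    refine set_update_of_subset _ _ (fun x hx => ?_)
    rcases List.mem_map.mp hx with ⟨q, hq, rfl⟩
    rcases List.mem_map.mp (hspairs ▸ hq) with ⟨p, hp, rfl⟩
    rw [PySem.Set.mem_ofList]
    exact List.mem_map.mpr ⟨p, (PySem.List.mem_sorted splits _ false p).mp hp, rfl⟩
  have hndB : dB.keys.Nodup := by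
    rw [hdBpairs]
    exact PySem.Dict.nodup_keys_foldl_modify_key spairs (fun q => q.1) [] _ _ hndB0
  have hvalB : ∀ c, dB.getD c []
      = ((ssorted.filter (fun p => p.headI == c)).map (fun p => p.tail)) := by
    intro c
    rw [hdBpairs, PySem.Dict.getD_foldl_modify_append, hvalB0]
    simp [hspairs, List.filter_map, List.map_map, Function.comp_def]
  -- per-key values agree: stable global sort restricted to a bucket = bucket sorted
  have hvals : ∀ c, gA (((splits.filter (fun p => p.headI == c)).map (fun p => p.tail)))
      = ((ssorted.filter (fun p => p.headI == c)).map (fun p => p.tail)) := by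
    intro c
    simp only [hgA, hss]
    rw [filter_sorted (fun p => 1 - (p.length : Int)) (fun p => p.headI == c) splits]
    rw [sorted_map (fun p => p.tail) (fun p => 1 - (p.length : Int))
      (fun x => -(x.length : Int)) (splits.filter (fun p => p.headI == c)) ?_]
    intro p hp
    have hpne : p ≠ [] := hne p (List.mem_of_mem_filter hp)
    cases p with
    | nil => exact absurd rfl hpne
    | cons h t => simp
  -- assemble via items
  rw [PySem.Dict.items_eq_map_keys dA2 hndA2 [], PySem.Dict.items_eq_map_keys dB hndB []]
  rw [hkeysA2, hkeysA, hkeysB]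
  refine List.map_congr_left (fun k hk => ?_)
  have hk' : k ∈ dA.keys := hkeysA ▸ hk
  rw [hvalA2 k hk', hvalA, hvalB, hvals]

-- ===== VERDICT (by name: the statement is the Claim_ definition above) =====
theorem build_pv_index_spec : Claim_equal_build_pv_index := by
  intro phrasal_verbs _ hpre
  show build_pv_index phrasal_verbs = build_pv_index_alt phrasal_verbs
  exact ports_agree phrasal_verbs hpre
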